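-- pv_equiv track=rewrite | github.com/Dfctdns/100balnyi | hard25.py | find_special_numbers
-- ===== SOURCE A (Python) =====
-- def find_special_numbers(d1_start, d1_end, d2_start, d2_end):
--
--     divisor_counts = {}
--
--     for num in range(d1_start, d1_end + 1):
--         for divisor in range(d2_start, d2_end + 1):
--             if num % divisor == 0:
--                 if divisor not in divisor_counts:
--                     divisor_counts[divisor] = 0
--                 divisor_counts[divisor] += 1
--
--     sorted_divisors = sorted(divisor_counts.items(), key=lambda x: (x[1], x[0]))
--
--     top_special_numbers = sorted_divisors[-3:]
--
--     return [(num, count) for num, count in top_special_numbers]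
-- ===== SOURCE B (Python) =====
-- def find_special_numbers(d1_start, d1_end, d2_start, d2_end):
--     if d1_start > d1_end:
--         return []
--     counts = []
--     for d in range(d2_start, d2_end + 1):
--         k = -d if d < 0 else d
--         # closed-form number of multiples of d in [d1_start, d1_end]
--         c = d1_end // k - (d1_start - 1) // k
--         if c > 0:
--             counts.append((d, c))
--     counts.sort(key=lambda x: (x[1], x[0]))
--     return counts[-3:]
-- ===== Notes on version B (the rewrite author's own statement) =====
-- stated objective: faster
-- what changed: Replaces the double loop over all (number, divisor) pairs and the counting dict by a closed-form count of multiples per divisor (floor division), building the (divisor, count) list directly before the same sort-and-take-3.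
import Mathlib
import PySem

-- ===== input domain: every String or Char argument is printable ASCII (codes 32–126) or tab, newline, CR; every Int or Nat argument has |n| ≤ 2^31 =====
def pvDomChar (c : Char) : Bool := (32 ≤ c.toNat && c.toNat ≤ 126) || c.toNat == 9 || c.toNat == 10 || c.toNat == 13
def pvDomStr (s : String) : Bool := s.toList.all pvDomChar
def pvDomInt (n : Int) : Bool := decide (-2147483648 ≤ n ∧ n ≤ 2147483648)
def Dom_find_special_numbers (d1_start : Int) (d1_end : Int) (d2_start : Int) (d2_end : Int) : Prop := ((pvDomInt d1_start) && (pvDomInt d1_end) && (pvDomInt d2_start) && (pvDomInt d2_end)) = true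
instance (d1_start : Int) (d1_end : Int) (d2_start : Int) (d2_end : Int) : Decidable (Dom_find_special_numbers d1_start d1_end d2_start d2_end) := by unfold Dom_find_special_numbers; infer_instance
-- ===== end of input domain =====

-- B replaces A's double loop over (number, divisor) pairs and its counting dict by a
-- closed-form floor-division count of multiples per divisor, then the same sort-and-take-3.


-- ===== PORT A =====
def find_special_numbers (d1_start : Int) (d1_end : Int) (d2_start : Int) (d2_end : Int) : List (Int × Int) :=
  let divisor_counts : PySem.Dict Int Int :=
    (PySem.List.pyRange d1_start (d1_end + 1)).foldl (fun dc num =>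
      (PySem.List.pyRange d2_start (d2_end + 1)).foldl (fun dc divisor =>
        if PySem.Int.mod num divisor == 0 then
          let dc := if dc.contains divisor then dc else dc.insert divisor 0
          dc.insert divisor (dc.getD divisor 0 + 1)
        else dc) dc) PySem.Dict.empty
  let sorted_divisors := PySem.List.sorted2 divisor_counts.items (fun x => x.2) (fun x => x.1)
  let top_special_numbers := PySem.List.slice sorted_divisors (some (-3))
  top_special_numbers.map (fun p => (p.1, p.2))

-- ===== PORT B =====
def find_special_numbers_alt (d1_start : Int) (d1_end : Int) (d2_start : Int) (d2_end : Int) : List (Int × Int) :=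
  if d1_start > d1_end then []
  else
    let counts : List (Int × Int) :=
      (PySem.List.pyRange d2_start (d2_end + 1)).foldl (fun acc d =>
        let k := if d < 0 then -d else d   -- abs(d), exact
        let c := PySem.Int.floordiv d1_end k - PySem.Int.floordiv (d1_start - 1) k
        if 0 < c then acc ++ [(d, c)] else acc) []
    PySem.List.slice (PySem.List.sorted2 counts (fun x => x.2) (fun x => x.1)) (some (-3))

-- ===== PRECONDITION & SPEC =====
-- Pre_ excludes exactly the inputs on which A raises ZeroDivisionError:
-- a nonempty number range together with 0 inside the divisor range.
def Pre_find_special_numbers (d1_start : Int) (d1_end : Int) (d2_start : Int) (d2_end : Int) : Prop :=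
  ¬ (d1_start ≤ d1_end ∧ d2_start ≤ 0 ∧ 0 ≤ d2_end)
instance (d1_start : Int) (d1_end : Int) (d2_start : Int) (d2_end : Int) : Decidable (Pre_find_special_numbers d1_start d1_end d2_start d2_end) := by unfold Pre_find_special_numbers; infer_instance

def pvWitness_find_special_numbers : Int × Int × Int × Int := (1, 20, 1, 6)

def Spec_find_special_numbers (d1_start : Int) (d1_end : Int) (d2_start : Int) (d2_end : Int) (out : List (Int × Int)) : Prop := out = find_special_numbers_alt d1_start d1_end d2_start d2_end
instance (d1_start : Int) (d1_end : Int) (d2_start : Int) (d2_end : Int) (out : List (Int × Int)) : Decidable (Spec_find_special_numbers d1_start d1_end d2_start d2_end out) := by unfold Spec_find_special_numbers; infer_instance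

-- ===== CLAIM (what is proved, stated in full; the proofs are below) =====
def Claim_equal_find_special_numbers : Prop := ∀ (d1_start : Int) (d1_end : Int) (d2_start : Int) (d2_end : Int), Dom_find_special_numbers d1_start d1_end d2_start d2_end → Pre_find_special_numbers d1_start d1_end d2_start d2_end → Spec_find_special_numbers d1_start d1_end d2_start d2_end (find_special_numbers d1_start d1_end d2_start d2_end)

-- ===== LEMMAS AND PROOFS =====

-- A's dict-update body is Dict.modify
lemma pvBodyEqModify (dc : PySem.Dict Int Int) (k : Int) :
    (let dc' := if dc.contains k then dc else dc.insert k 0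
     dc'.insert k (dc'.getD k 0 + 1)) = dc.modify k 0 (· + 1) := by
  by_cases h : dc.contains k = true
  · simp [h, PySem.Dict.modify]
  · simp only [h, Bool.false_eq_true, if_false]
    rw [PySem.Dict.getD_insert_self, PySem.Dict.insert_insert_self, PySem.Dict.modify,
      PySem.Dict.getD_of_not_contains dc 0 (by simpa using h)]

-- a fold of folds is a fold over the flatMap
lemma pvFoldlFlatMap {α β σ : Type} (g : α → List β) (F : σ → β → σ) :
    ∀ (l : List α) (init : σ),
      l.foldl (fun s x => (g x).foldl F s) init = (l.flatMap g).foldl F init := by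
  intro l
  induction l with
  | nil => intro init; simp
  | cons x t ih => intro init; simp [List.flatMap_cons, List.foldl_append, ih]

-- the fold of insertBy with a strict key comparison produces a key-sorted list
lemma pvFoldlInsertBySorted {α κ : Type} [LinearOrder κ] (key : α → κ) :
    ∀ (xs acc : List α), acc.Pairwise (fun a b => key a ≤ key b) →
      (xs.foldl (fun acc x => PySem.List.insertBy (fun a b => decide (key a < key b)) x acc) acc).Pairwise
        (fun a b => key a ≤ key b) := by
  intro xs
  induction xs with
  | nil => intro acc h; simpa
  | cons x t ih => intro acc h; exact ih _ (PySem.List.insertBy_pairwise_le key x acc h)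

-- sorted2 with the (snd, fst) key depends only on the multiset of elements
lemma pvSorted2Perm (xs ys : List (Int × Int)) (h : xs.Perm ys) :
    PySem.List.sorted2 xs (fun x => x.2) (fun x => x.1) =
    PySem.List.sorted2 ys (fun x => x.2) (fun x => x.1) := by
  have hkeyinj : Function.Injective (fun p : Int × Int => toLex (p.2, p.1)) := by
    intro p q hpq
    have h2 := toLex.injective hpq
    simp only [Prod.mk.injEq] at h2
    exact Prod.ext h2.2 h2.1
  have hbefore :
      (fun a b : Int × Int => decide (a.2 < b.2) || (!decide (b.2 < a.2) && decide (a.1 < b.1)))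
        = fun a b : Int × Int => decide ((fun p : Int × Int => toLex (p.2, p.1)) a <
            (fun p : Int × Int => toLex (p.2, p.1)) b) := by
    funext a b
    apply Bool.eq_iff_iff.mpr
    simp only [Bool.or_eq_true, Bool.and_eq_true, Bool.not_eq_true', decide_eq_true_eq,
      decide_eq_false_iff_not, Prod.Lex.lt_iff]
    dsimp only [ofLex_toLex]
    omega
  have hform : ∀ zs : List (Int × Int),
      PySem.List.sorted2 zs (fun x => x.2) (fun x => x.1) =
      zs.foldl (fun acc x =>
        PySem.List.insertBy (fun a b => decide ((fun p : Int × Int => toLex (p.2, p.1)) a <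
          (fun p : Int × Int => toLex (p.2, p.1)) b)) x acc) [] := by
    intro zs
    show zs.foldl (fun acc x => PySem.List.insertBy _ x acc) [] = _
    rw [hbefore]
    simp
  have hs1 := pvFoldlInsertBySorted (fun p : Int × Int => toLex (p.2, p.1)) xs [] (by simp)
  have hs2 := pvFoldlInsertBySorted (fun p : Int × Int => toLex (p.2, p.1)) ys [] (by simp)
  have hp1 : (PySem.List.sorted2 xs (fun x => x.2) (fun x => x.1)).Perm
      (PySem.List.sorted2 ys (fun x => x.2) (fun x => x.1)) :=
    ((PySem.List.sorted2_perm xs _ _ false).trans h).trans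
      (PySem.List.sorted2_perm ys _ _ false).symm
  rw [hform xs, hform ys]
  rw [hform xs, hform ys] at hp1
  exact PySem.List.eq_of_perm_of_pairwise_le_of_injective
    (fun p : Int × Int => toLex (p.2, p.1)) hkeyinj hp1 hs1 hs2

-- m // k - (m-1) // k detects divisibility (k > 0)
lemma pvFloordivStep (k m : Int) (hk : 0 < k) :
    PySem.Int.floordiv m k - PySem.Int.floordiv (m - 1) k = if k ∣ m then 1 else 0 := by
  have hq := (PySem.Int.floordiv_eq_iff_of_pos (a := m - 1) hk).mp rfl
  by_cases hd : k ∣ m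
  · obtain ⟨c, hc⟩ := hd
    have hd' : k ∣ m := ⟨c, hc⟩
    have hlt : PySem.Int.floordiv (m - 1) k < c := by nlinarith [hq.1]
    have hge : c ≤ PySem.Int.floordiv (m - 1) k + 1 := by nlinarith [hq.2]
    have hceq : c = PySem.Int.floordiv (m - 1) k + 1 := le_antisymm hge hlt
    have heq : PySem.Int.floordiv m k = PySem.Int.floordiv (m - 1) k + 1 := by
      rw [PySem.Int.floordiv_eq_iff_of_pos hk]
      constructor
      · nlinarith [hc, hceq]
      · nlinarith [hq.2, hc, hceq]
    rw [heq, if_pos hd']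
    ring
  · have heq : PySem.Int.floordiv m k = PySem.Int.floordiv (m - 1) k := by
      rw [PySem.Int.floordiv_eq_iff_of_pos hk]
      refine ⟨by linarith [hq.1], ?_⟩
      rcases lt_or_eq_of_le (show m ≤ (PySem.Int.floordiv (m - 1) k + 1) * k by linarith [hq.2]) with h1 | h1
      · exact h1
      · exact absurd ⟨PySem.Int.floordiv (m - 1) k + 1, by linarith [mul_comm (PySem.Int.floordiv (m - 1) k + 1) k]⟩ hd
    rw [heq, if_neg hd]
    ring

-- closed-form count of multiples of k in a range (k > 0)
lemma pvCountMultiples (k : Int) (hk : 0 < k) :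
    ∀ (n : Nat) (s : Int),
      (((PySem.List.pyRange s (s + n)).countP (fun x => decide (k ∣ x))) : Int) =
        PySem.Int.floordiv (s + n - 1) k - PySem.Int.floordiv (s - 1) k := by
  intro n
  induction n with
  | zero =>
    intro s
    rw [PySem.List.pyRange_one_eq_nil (by simp)]
    simp
  | succ n ih =>
    intro s
    have hsb : s ≤ s + (n : Int) := by omega
    have hsplit : (s + ((n + 1 : Nat) : Int)) = (s + (n : Nat)) + 1 := by push_cast; ring
    rw [hsplit, PySem.List.pyRange_one_succ_right hsb, List.countP_append, List.countP_singleton]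
    have hstep := pvFloordivStep k (s + n) hk
    have ihs := ih s
    by_cases hd : k ∣ (s + (n : Int))
    · rw [if_pos hd] at hstep
      rw [decide_eq_true hd, if_pos rfl]
      push_cast
      ring_nf at hstep ihs ⊢
      omega
    · rw [if_neg hd] at hstep
      rw [decide_eq_false hd]
      simp only [Bool.false_eq_true, if_false]
      push_cast
      ring_nf at hstep ihs ⊢
      omega

-- the multiset of (number, divisor) hits, as a list of divisors
def pvL (d1_start d1_end d2_start d2_end : Int) : List Int :=
  (PySem.List.pyRange d1_start (d1_end + 1)).flatMap
    (fun num => (PySem.List.pyRange d2_start (d2_end + 1)).filter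
      (fun dv => PySem.Int.mod num dv == 0))

-- B's closed-form count of multiples of d in [d1_start, d1_end]
def pvC (d1_start d1_end d : Int) : Int :=
  PySem.Int.floordiv d1_end (if d < 0 then -d else d) -
    PySem.Int.floordiv (d1_start - 1) (if d < 0 then -d else d)

-- A's counting dict is Counter(pvL …), so its items are the distinct hit divisors with their hit counts
lemma pvAList (d1_start d1_end d2_start d2_end : Int) :
    find_special_numbers d1_start d1_end d2_start d2_end =
      (PySem.List.slice
        (PySem.List.sorted2
          ((PySem.Set.ofList (pvL d1_start d1_end d2_start d2_end)).map
            (fun k => (k, ((pvL d1_start d1_end d2_start d2_end).count k : Int))))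
          (fun x => x.2) (fun x => x.1))
        (some (-3))).map (fun p => (p.1, p.2)) := by
  unfold find_special_numbers
  have h1 : ∀ (num : Int) (dc : PySem.Dict Int Int), (PySem.List.pyRange d2_start (d2_end + 1)).foldl
      (fun (dc : PySem.Dict Int Int) divisor =>
        if PySem.Int.mod num divisor == 0 then
          let dc := if dc.contains divisor then dc else dc.insert divisor 0
          dc.insert divisor (dc.getD divisor 0 + 1)
        else dc) dc =
      ((PySem.List.pyRange d2_start (d2_end + 1)).filter
        (fun dv => PySem.Int.mod num dv == 0)).foldl
        (fun (dc : PySem.Dict Int Int) k => dc.modify k 0 (· + 1)) dc := by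
    intro num dc
    rw [PySem.List.foldl_congr_mem _ _
      (fun (dc : PySem.Dict Int Int) divisor => if PySem.Int.mod num divisor == 0
        then dc.modify divisor 0 (· + 1) else dc) _ ?_]
    · exact PySem.List.foldl_if_eq_foldl_filter _ _ _ _
    · intro acc x _
      dsimp only
      by_cases hc : (PySem.Int.mod num x == 0) = true
      · rw [if_pos hc, if_pos hc]; exact pvBodyEqModify acc x
      · rw [if_neg hc, if_neg hc]
  have h2 : (PySem.List.pyRange d1_start (d1_end + 1)).foldl
      (fun (dc : PySem.Dict Int Int) num => (PySem.List.pyRange d2_start (d2_end + 1)).foldl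
        (fun (dc : PySem.Dict Int Int) divisor =>
          if PySem.Int.mod num divisor == 0 then
            let dc := if dc.contains divisor then dc else dc.insert divisor 0
            dc.insert divisor (dc.getD divisor 0 + 1)
          else dc) dc) PySem.Dict.empty =
      PySem.Dict.counter (pvL d1_start d1_end d2_start d2_end) := by
    rw [PySem.List.foldl_congr_mem _ _
      (fun (dc : PySem.Dict Int Int) num => ((PySem.List.pyRange d2_start (d2_end + 1)).filter
        (fun dv => PySem.Int.mod num dv == 0)).foldl
        (fun (dc : PySem.Dict Int Int) k => dc.modify k 0 (· + 1)) dc) _ (fun acc x _ => h1 x acc)]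
    rw [pvFoldlFlatMap, PySem.Dict.counter_eq_foldl]
    rfl
  simp only [h2, PySem.Dict.items_counter]

-- B computes the filtered (divisor, closed-form count) list before sorting
lemma pvBList (d1_start d1_end d2_start d2_end : Int) (h : ¬ d1_start > d1_end) :
    find_special_numbers_alt d1_start d1_end d2_start d2_end =
      PySem.List.slice
        (PySem.List.sorted2
          (((PySem.List.pyRange d2_start (d2_end + 1)).filter
              (fun d => decide (0 < pvC d1_start d1_end d))).map
            (fun d => (d, pvC d1_start d1_end d)))
          (fun x => x.2) (fun x => x.1))
        (some (-3)) := by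
  unfold find_special_numbers_alt
  rw [if_neg h]
  show PySem.List.slice (PySem.List.sorted2
    ((PySem.List.pyRange d2_start (d2_end + 1)).foldl
      (fun acc d => if 0 < pvC d1_start d1_end d
        then acc ++ [(d, pvC d1_start d1_end d)] else acc) []) _ _) _ = _
  rw [PySem.List.foldl_append_ite (fun d => 0 < pvC d1_start d1_end d)
    (fun d => (d, pvC d1_start d1_end d))]
  rw [List.nil_append]

lemma pvMemL (d1_start d1_end d2_start d2_end k : Int) :
    k ∈ pvL d1_start d1_end d2_start d2_end ↔
      k ∈ PySem.List.pyRange d2_start (d2_end + 1) ∧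
        ∃ num ∈ PySem.List.pyRange d1_start (d1_end + 1),
          (PySem.Int.mod num k == 0) = true := by
  unfold pvL
  simp only [List.mem_flatMap, List.mem_filter]
  tauto

lemma pvSumIte {α : Type} (p : α → Bool) (xs : List α) :
    (xs.map (fun x => if p x = true then (1 : Nat) else 0)).sum = xs.countP p := by
  induction xs with
  | nil => simp
  | cons x t ih => by_cases h : p x <;> simp [h, ih, Nat.add_comm]

-- the number of hits of divisor k equals B's closed-form count
lemma pvCountEq (d1_start d1_end d2_start d2_end : Int) (hse : d1_start ≤ d1_end) (k : Int)
    (hk : k ∈ PySem.List.pyRange d2_start (d2_end + 1)) (hkz : k ≠ 0) :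
    ((pvL d1_start d1_end d2_start d2_end).count k : Int) = pvC d1_start d1_end k := by
  have kkpos : (0 : Int) < (if k < 0 then -k else k) := by split <;> omega
  unfold pvL
  rw [List.count_flatMap]
  have hone : (PySem.List.pyRange d1_start (d1_end + 1)).map
      ((fun l => List.count k l) ∘ (fun num => (PySem.List.pyRange d2_start (d2_end + 1)).filter
        (fun dv => PySem.Int.mod num dv == 0))) =
      (PySem.List.pyRange d1_start (d1_end + 1)).map
        (fun num => if (PySem.Int.mod num k == 0) = true then 1 else 0) := by
    apply List.map_congr_left
    intro num _
    by_cases hc : (PySem.Int.mod num k == 0) = true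
    · simp only [Function.comp_apply, if_pos hc]
      rw [List.count_filter (p := fun dv => PySem.Int.mod num dv == 0) (a := k) hc,
        List.count_eq_one_of_mem (PySem.List.nodup_pyRange_one d2_start (d2_end + 1)) hk]
    · simp only [Function.comp_apply, if_neg hc]
      rw [List.count_eq_zero]
      intro hmem
      exact hc (List.mem_filter.mp hmem).2
  rw [show ((fun a => List.count k a) ∘ fun num => List.filter (fun dv => PySem.Int.mod num dv == 0) (PySem.List.pyRange d2_start (d2_end + 1))) = ((fun l => List.count k l) ∘ (fun num => (PySem.List.pyRange d2_start (d2_end + 1)).filter (fun dv => PySem.Int.mod num dv == 0))) from rfl, hone,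
    pvSumIte]
  rw [List.countP_congr (q := fun x => decide ((if k < 0 then -k else k) ∣ x)) ?_]
  · have hn : d1_start + (((d1_end + 1 - d1_start).toNat : Nat) : Int) = d1_end + 1 := by
      omega
    have hcm := pvCountMultiples (if k < 0 then -k else k) kkpos
      (d1_end + 1 - d1_start).toNat d1_start
    rw [hn] at hcm
    rw [hcm]
    unfold pvC
    have he : d1_end + 1 - 1 = d1_end := by ring
    rw [he]
  · intro x _
    rw [beq_iff_eq]
    constructor
    · intro hx
      have := (PySem.Int.mod_eq_zero_iff_dvd x k).mp hx
      rw [decide_eq_true_iff]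
      by_cases hneg : k < 0
      · simpa [hneg, neg_dvd] using this
      · simpa [hneg] using this
    · intro hx
      rw [decide_eq_true_iff] at hx
      apply (PySem.Int.mod_eq_zero_iff_dvd x k).mpr
      by_cases hneg : k < 0
      · rw [if_pos hneg, neg_dvd] at hx; exact hx
      · rw [if_neg hneg] at hx; exact hx

-- the items of A's counter are a rearrangement of B's filtered list
lemma pvPerm (d1_start d1_end d2_start d2_end : Int) (hse : d1_start ≤ d1_end)
    (hz : ∀ k ∈ PySem.List.pyRange d2_start (d2_end + 1), k ≠ 0) :
    ((PySem.Set.ofList (pvL d1_start d1_end d2_start d2_end)).map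
      (fun k => (k, ((pvL d1_start d1_end d2_start d2_end).count k : Int)))).Perm
    (((PySem.List.pyRange d2_start (d2_end + 1)).filter
        (fun d => decide (0 < pvC d1_start d1_end d))).map
      (fun d => (d, pvC d1_start d1_end d))) := by
  have hbase : (PySem.Set.ofList (pvL d1_start d1_end d2_start d2_end)).Perm
      ((PySem.List.pyRange d2_start (d2_end + 1)).filter
        (fun d => decide (0 < pvC d1_start d1_end d))) := by
    rw [List.perm_ext_iff_of_nodup (PySem.Set.nodup_ofList _)
      ((PySem.List.nodup_pyRange_one d2_start (d2_end + 1)).filter _)]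
    intro k
    rw [PySem.Set.mem_ofList, List.mem_filter, decide_eq_true_iff]
    constructor
    · intro hkL
      have hkD := ((pvMemL d1_start d1_end d2_start d2_end k).mp hkL).1
      refine ⟨hkD, ?_⟩
      rw [← pvCountEq d1_start d1_end d2_start d2_end hse k hkD (hz k hkD)]
      exact_mod_cast List.count_pos_iff.mpr hkL
    · rintro ⟨hkD, hpos⟩
      have hcnt := pvCountEq d1_start d1_end d2_start d2_end hse k hkD (hz k hkD)
      have hcpos : 0 < ((pvL d1_start d1_end d2_start d2_end).count k : Int) := hcnt ▸ hpos
      exact List.count_pos_iff.mp (by exact_mod_cast hcpos)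
  have hmapeq : (PySem.Set.ofList (pvL d1_start d1_end d2_start d2_end)).map
      (fun k => (k, ((pvL d1_start d1_end d2_start d2_end).count k : Int))) =
      (PySem.Set.ofList (pvL d1_start d1_end d2_start d2_end)).map
        (fun k => (k, pvC d1_start d1_end k)) := by
    apply List.map_congr_left
    intro k hkS
    have hkL := (PySem.Set.mem_ofList _ _).mp hkS
    have hkD := ((pvMemL d1_start d1_end d2_start d2_end k).mp hkL).1
    rw [pvCountEq d1_start d1_end d2_start d2_end hse k hkD (hz k hkD)]
  rw [hmapeq]
  exact hbase.map _

-- ===== VERDICT (by name: the statement is the Claim_ definition above) =====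
theorem find_special_numbers_spec : Claim_equal_find_special_numbers := by
  intro d1_start d1_end d2_start d2_end hdom hpre
  unfold Spec_find_special_numbers
  by_cases hse : d1_end < d1_start
  · rw [pvAList]
    have hnil : pvL d1_start d1_end d2_start d2_end = [] := by
      unfold pvL
      rw [show PySem.List.pyRange d1_start (d1_end + 1) = []
        from PySem.List.pyRange_one_eq_nil (by omega)]
      rfl
    rw [hnil]
    simp [find_special_numbers_alt, if_pos (show d1_start > d1_end by omega),
      PySem.List.sorted2, PySem.List.slice]
  · have hse' : d1_start ≤ d1_end := by omega
    have hz : ∀ k ∈ PySem.List.pyRange d2_start (d2_end + 1), k ≠ 0 := by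
      intro k hk hk0
      have hb := PySem.List.mem_pyRange_one.mp hk
      exact hpre ⟨hse', by omega, by omega⟩
    rw [pvAList, pvBList d1_start d1_end d2_start d2_end (by omega),
      pvSorted2Perm _ _ (pvPerm d1_start d1_end d2_start d2_end hse' hz)]
    simp
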